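-- pv_equiv track=rewrite | github.com/Kozak15/CB_Paul_2027_Computing | CB_Paul.py | find_suspicious_spots
-- ===== SOURCE A (Python) =====
-- def find_suspicious_spots(grid):
--     least_suspicious = [0,0]
--     most_suspicious = [0,0]
--     for i in range(len(grid)):
--         for j in range(len(grid[0])):
--             if grid[i][j] < grid[least_suspicious[0]][least_suspicious[1]]:
--                 least_suspicious = [i,j]
--             if grid[i][j] > grid[most_suspicious[0]][most_suspicious[1]]:
--                 most_suspicious = [i,j]
--     return (least_suspicious, most_suspicious)
-- ===== SOURCE B (Python) =====
-- def find_suspicious_spots(grid):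
--     if not grid or not grid[0]:
--         return ([0, 0], [0, 0])
--     w = len(grid[0])
--     cells = [(grid[i][j], i, j) for i in range(len(grid)) for j in range(w)]
--
--     def tournament(lo, hi):
--         # divide-and-conquer: (min-cell, max-cell) of cells[lo:hi], left-biased on ties
--         if hi - lo == 1:
--             c = cells[lo]
--             return (c, c)
--         mid = (lo + hi) // 2
--         lmin, lmax = tournament(lo, mid)
--         rmin, rmax = tournament(mid, hi)
--         mn = rmin if rmin[0] < lmin[0] else lmin
--         mx = rmax if rmax[0] > lmax[0] else lmax
--         return (mn, mx)
--
--     mn, mx = tournament(0, len(cells))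
--     return ([mn[1], mn[2]], [mx[1], mx[2]])
-- ===== Notes on version B (the rewrite author's own statement) =====
-- stated objective: alternative
-- what changed: Replaces A's single linear scan with two position accumulators by flattening the grid once into (value,i,j) cells and computing both extremes with a recursive divide-and-conquer tournament (halve, recurse, combine left-biased), guarding the empty-grid/empty-row case up front.
import Mathlib
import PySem

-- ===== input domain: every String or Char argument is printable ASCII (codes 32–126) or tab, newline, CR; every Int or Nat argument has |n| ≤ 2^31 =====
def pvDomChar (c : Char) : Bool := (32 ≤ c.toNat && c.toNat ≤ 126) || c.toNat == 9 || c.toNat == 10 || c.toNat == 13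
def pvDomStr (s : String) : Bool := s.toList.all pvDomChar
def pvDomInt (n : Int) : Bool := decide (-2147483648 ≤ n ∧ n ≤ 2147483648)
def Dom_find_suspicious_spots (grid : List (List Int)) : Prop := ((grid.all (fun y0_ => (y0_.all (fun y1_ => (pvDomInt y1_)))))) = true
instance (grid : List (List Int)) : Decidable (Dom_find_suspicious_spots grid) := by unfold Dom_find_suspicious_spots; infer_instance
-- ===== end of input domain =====

-- B replaces A's single linear scan with two position accumulators by a recursive
-- divide-and-conquer tournament over the flattened (value,i,j) cell list (alternative decomposition).

-- ===== PORT A =====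
-- A's nested for-loops over range(len(grid)) × range(len(grid[0])), carrying the pair
-- (least, most) of index pairs; grid[i][j] is ported as getD (exact inside Pre_, where no
-- IndexError can occur; outside Pre_ the Python raises).
def find_suspicious_spots (grid : List (List Int)) : List Int × List Int :=
  let g : Nat × Nat → Int := fun p => (grid.getD p.1 []).getD p.2 0
  let res :=
    (List.range grid.length).foldl (fun st i =>
      (List.range (grid.headD []).length).foldl (fun st j =>
        ((if g (i, j) < g st.1 then (i, j) else st.1),
         (if g st.2 < g (i, j) then (i, j) else st.2))) st)
      ((0, 0), (0, 0))
  ([(res.1.1 : Int), (res.1.2 : Int)], [(res.2.1 : Int), (res.2.2 : Int)])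

-- ===== PORT B =====
-- Source B's tournament(lo, hi) recurses on the index range of the cell list, splitting at
-- (lo+hi)//2; ported as recursion on the sublist, split with take/drop at length/2
-- (the same midpoint, since (lo+hi)//2 - lo = (hi-lo)//2). The [] branch is unreachable
-- (Source B is only called with hi - lo ≥ 1); it only makes the port total.
def pvTournament (cells : List (Int × Nat × Nat)) : (Int × Nat × Nat) × (Int × Nat × Nat) :=
  match cells with
  | [] => ((0, 0, 0), (0, 0, 0))
  | [c] => (c, c)
  | x :: y :: rest =>
    let l := x :: y :: rest
    let mid := l.length / 2
    let lr := pvTournament (l.take mid)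
    let rr := pvTournament (l.drop mid)
    ((if rr.1.1 < lr.1.1 then rr.1 else lr.1),
     (if lr.2.1 < rr.2.1 then rr.2 else lr.2))
termination_by cells.length
decreasing_by
  · simp; omega
  · simp; omega

def find_suspicious_spots_alt (grid : List (List Int)) : List Int × List Int :=
  if grid = [] ∨ grid.headD [] = [] then ([0, 0], [0, 0])
  else
    let w := (grid.headD []).length
    let cells := (List.range grid.length).flatMap
      (fun i => (List.range w).map (fun j => ((grid.getD i []).getD j 0, i, j)))
    let r := pvTournament cells
    ([(r.1.2.1 : Int), (r.1.2.2 : Int)], [(r.2.2.1 : Int), (r.2.2.2 : Int)])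

-- ===== PRECONDITION & SPEC =====
-- Pre_ excludes exactly the ragged grids on which Python A raises IndexError
-- (some row shorter than the first row); A returns normally on every other input.
def Pre_find_suspicious_spots (grid : List (List Int)) : Prop :=
  ∀ row ∈ grid, (grid.headD []).length ≤ row.length
instance (grid : List (List Int)) : Decidable (Pre_find_suspicious_spots grid) := by
  unfold Pre_find_suspicious_spots; infer_instance
def pvWitness_find_suspicious_spots : List (List Int) := [[1, 2], [3, 0]]

def Spec_find_suspicious_spots (grid : List (List Int)) (out : List Int × List Int) : Prop := out = find_suspicious_spots_alt grid
instance (grid : List (List Int)) (out : List Int × List Int) : Decidable (Spec_find_suspicious_spots grid out) := by unfold Spec_find_suspicious_spots; infer_instance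

-- ===== CLAIM (what is proved, stated in full; the proofs are below) =====
def Claim_equal_find_suspicious_spots : Prop := ∀ (grid : List (List Int)), Dom_find_suspicious_spots grid → Pre_find_suspicious_spots grid → Spec_find_suspicious_spots grid (find_suspicious_spots grid)

-- ===== LEMMAS AND PROOFS =====

-- the two left-biased combine operators of the tournament
def pvOpMin (a b : Int × Nat × Nat) : Int × Nat × Nat := if b.1 < a.1 then b else a
def pvOpMax (a b : Int × Nat × Nat) : Int × Nat × Nat := if a.1 < b.1 then b else a

theorem pvOpMin_assoc (a b c : Int × Nat × Nat) :
    pvOpMin (pvOpMin a b) c = pvOpMin a (pvOpMin b c) := by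
  simp only [pvOpMin]; split_ifs <;> first | rfl | omega

theorem pvOpMax_assoc (a b c : Int × Nat × Nat) :
    pvOpMax (pvOpMax a b) c = pvOpMax a (pvOpMax b c) := by
  simp only [pvOpMax]; split_ifs <;> first | rfl | omega

-- foldl1 of the two operators
def pvFmin : List (Int × Nat × Nat) → Int × Nat × Nat
  | [] => (0, 0, 0)
  | x :: xs => xs.foldl pvOpMin x

def pvFmax : List (Int × Nat × Nat) → Int × Nat × Nat
  | [] => (0, 0, 0)
  | x :: xs => xs.foldl pvOpMax x

theorem foldl_assoc_pull {α : Type} (op : α → α → α)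
    (hop : ∀ a b c, op (op a b) c = op a (op b c)) :
    ∀ (ys : List α) (b y : α), ys.foldl op (op b y) = op b (ys.foldl op y) := by
  intro ys
  induction ys with
  | nil => intro b y; rfl
  | cons z zs ih =>
    intro b y
    simp only [List.foldl_cons, hop]
    exact ih b (op y z)

theorem pvFmin_append (l1 l2 : List (Int × Nat × Nat)) (h1 : l1 ≠ []) (h2 : l2 ≠ []) :
    pvFmin (l1 ++ l2) = pvOpMin (pvFmin l1) (pvFmin l2) := by
  cases l1 with
  | nil => exact absurd rfl h1
  | cons x xs =>
    cases l2 with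
    | nil => exact absurd rfl h2
    | cons y ys =>
      simp only [pvFmin, List.cons_append, List.foldl_cons, List.foldl_append]
      exact foldl_assoc_pull pvOpMin pvOpMin_assoc ys (xs.foldl pvOpMin x) y

theorem pvFmax_append (l1 l2 : List (Int × Nat × Nat)) (h1 : l1 ≠ []) (h2 : l2 ≠ []) :
    pvFmax (l1 ++ l2) = pvOpMax (pvFmax l1) (pvFmax l2) := by
  cases l1 with
  | nil => exact absurd rfl h1
  | cons x xs =>
    cases l2 with
    | nil => exact absurd rfl h2
    | cons y ys =>
      simp only [pvFmax, List.cons_append, List.foldl_cons, List.foldl_append]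
      exact foldl_assoc_pull pvOpMax pvOpMax_assoc ys (xs.foldl pvOpMax x) y

-- the tournament computes the pair of foldl1 reductions
theorem pvTournament_eq (cells : List (Int × Nat × Nat)) (h : cells ≠ []) :
    pvTournament cells = (pvFmin cells, pvFmax cells) := by
  match cells with
  | [] => exact absurd rfl h
  | [c] => simp [pvTournament, pvFmin, pvFmax]
  | x :: y :: rest =>
    set l := x :: y :: rest with hl
    set mid := l.length / 2 with hmid
    have hmid1 : 1 ≤ mid := by simp [hmid, hl]; omega
    have hmidlt : mid < l.length := by simp [hmid, hl]; omega
    have htake_ne : l.take mid ≠ [] := by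
      intro hc
      have := congrArg List.length hc
      simp at this; omega
    have hdrop_ne : l.drop mid ≠ [] := by
      intro hc
      have := congrArg List.length hc
      simp at this; omega
    have ih1 := pvTournament_eq (l.take mid) htake_ne
    have ih2 := pvTournament_eq (l.drop mid) hdrop_ne
    have hsplit : l.take mid ++ l.drop mid = l := List.take_append_drop mid l
    rw [show pvTournament l =
        ((if (pvTournament (l.drop mid)).1.1 < (pvTournament (l.take mid)).1.1
            then (pvTournament (l.drop mid)).1 else (pvTournament (l.take mid)).1),
         (if (pvTournament (l.take mid)).2.1 < (pvTournament (l.drop mid)).2.1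
            then (pvTournament (l.drop mid)).2 else (pvTournament (l.take mid)).2)) from by
      conv_lhs => rw [hl, pvTournament]]
    rw [ih1, ih2]
    conv_rhs => rw [← hsplit]
    rw [pvFmin_append _ _ htake_ne hdrop_ne, pvFmax_append _ _ htake_ne hdrop_ne]
    simp [pvOpMin, pvOpMax]
termination_by cells.length
decreasing_by
  · simp; omega
  · simp; omega

-- the combined two-accumulator fold is the pair of the two one-accumulator folds
theorem foldl_pair_split {α : Type} (g : α → Int) (l : List α) (a b : α) :
    l.foldl (fun st x =>
      ((if g x < g st.1 then x else st.1), (if g st.2 < g x then x else st.2))) (a, b)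
    = (l.foldl (fun m x => if g x < g m then x else m) a,
       l.foldl (fun m x => if g m < g x then x else m) b) := by
  induction l generalizing a b with
  | nil => rfl
  | cons h t ih => simp [List.foldl_cons, ih]

-- fold over the flatMap coordinate list = A's nested fold
theorem foldl_flatMap_eq {α β σ : Type} (l : List α) (gmap : α → List β)
    (f : σ → β → σ) (init : σ) :
    (l.flatMap gmap).foldl f init = l.foldl (fun acc a => (gmap a).foldl f acc) init := by
  induction l generalizing init with
  | nil => rfl
  | cons h t ih => simp [List.flatMap_cons, List.foldl_append, ih]

theorem range_ne_zero_cons (k : Nat) (hk : k ≠ 0) :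
    ∃ t, List.range k = 0 :: t := by
  cases k with
  | zero => exact absurd rfl hk
  | succ k' => exact ⟨List.map Nat.succ (List.range k'), List.range_succ_eq_map⟩

-- the value-carrying folds are the embedded position folds
theorem foldl_opmin_map (g : Nat × Nat → Int) (l : List (Nat × Nat)) (a : Nat × Nat) :
    (l.map (fun p => (g p, p))).foldl pvOpMin (g a, a)
      = (fun p => (g p, p)) (l.foldl (fun m x => if g x < g m then x else m) a) := by
  induction l generalizing a with
  | nil => rfl
  | cons h t ih =>
    simp only [List.map_cons, List.foldl_cons, pvOpMin]
    by_cases hc : g h < g a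
    · simp only [if_pos hc]; exact ih h
    · simp only [if_neg hc]; exact ih a

theorem foldl_opmax_map (g : Nat × Nat → Int) (l : List (Nat × Nat)) (a : Nat × Nat) :
    (l.map (fun p => (g p, p))).foldl pvOpMax (g a, a)
      = (fun p => (g p, p)) (l.foldl (fun m x => if g m < g x then x else m) a) := by
  induction l generalizing a with
  | nil => rfl
  | cons h t ih =>
    simp only [List.map_cons, List.foldl_cons, pvOpMax]
    by_cases hc : g a < g h
    · simp only [if_pos hc]; exact ih h
    · simp only [if_neg hc]; exact ih a

-- the whole equality, over an abstract key g and dimensions n m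
theorem nested_fold_eq_tournament (g : Nat × Nat → Int) (n m : Nat) (hn : n ≠ 0) (hm : m ≠ 0) :
    (let res :=
      (List.range n).foldl (fun st i =>
        (List.range m).foldl (fun st j =>
          ((if g (i, j) < g st.1 then (i, j) else st.1),
           (if g st.2 < g (i, j) then (i, j) else st.2))) st)
        (((0, 0) : Nat × Nat), ((0, 0) : Nat × Nat))
     ([(res.1.1 : Int), (res.1.2 : Int)], [(res.2.1 : Int), (res.2.2 : Int)]))
    = (let cells := (List.range n).flatMap (fun i => (List.range m).map (fun j => (g (i, j), i, j)))
       let r := pvTournament cells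
       ([(r.1.2.1 : Int), (r.1.2.2 : Int)], [(r.2.2.1 : Int), (r.2.2.2 : Int)])) := by
  obtain ⟨ti, hti⟩ := range_ne_zero_cons n hn
  obtain ⟨tj, htj⟩ := range_ne_zero_cons m hm
  set posCells := (List.range n).flatMap (fun i => (List.range m).map (fun j => (i, j)))
    with hposdef
  have hpos_cons : posCells = ((0, 0) : Nat × Nat) :: ((tj.map (fun j => ((0 : Nat), j)))
      ++ ti.flatMap (fun i => (List.range m).map (fun j => (i, j)))) := by
    rw [hposdef, hti, List.flatMap_cons, htj]
    simp
  set rest := (tj.map (fun j => ((0 : Nat), j)))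
      ++ ti.flatMap (fun i => (List.range m).map (fun j => (i, j))) with hrest
  -- B's value-carrying cell list is the embedded position list
  have hcells : (List.range n).flatMap (fun i => (List.range m).map (fun j => (g (i, j), i, j)))
      = posCells.map (fun p => (g p, p)) := by
    rw [hposdef, List.map_flatMap]
    simp [List.map_map, Function.comp_def]
  -- A's nested fold is the fold over the flatMap position list
  have hA : (List.range n).foldl (fun st i =>
        (List.range m).foldl (fun st j =>
          ((if g (i, j) < g st.1 then (i, j) else st.1),
           (if g st.2 < g (i, j) then (i, j) else st.2))) st)
        (((0, 0) : Nat × Nat), ((0, 0) : Nat × Nat))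
      = posCells.foldl (fun st x =>
          ((if g x < g st.1 then x else st.1), (if g st.2 < g x then x else st.2)))
        (((0, 0) : Nat × Nat), ((0, 0) : Nat × Nat)) := by
    rw [hposdef, foldl_flatMap_eq]
    simp only [List.foldl_map]
  have hAfold : posCells.foldl (fun st x =>
          ((if g x < g st.1 then x else st.1), (if g st.2 < g x then x else st.2)))
        (((0, 0) : Nat × Nat), ((0, 0) : Nat × Nat))
      = (rest.foldl (fun mm x => if g x < g mm then x else mm) (0, 0),
         rest.foldl (fun mm x => if g mm < g x then x else mm) (0, 0)) := by
    rw [hpos_cons, List.foldl_cons]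
    have h0 : ((if g ((0 : Nat), (0 : Nat)) < g ((0 : Nat), (0 : Nat)) then ((0 : Nat), (0 : Nat)) else ((0 : Nat), (0 : Nat))),
        (if g ((0 : Nat), (0 : Nat)) < g ((0 : Nat), (0 : Nat)) then ((0 : Nat), (0 : Nat)) else ((0 : Nat), (0 : Nat))))
        = (((0, 0) : Nat × Nat), ((0, 0) : Nat × Nat)) := by simp
    rw [h0, foldl_pair_split g]
  -- B's tournament over the embedded list
  have hne : posCells.map (fun p => (g p, p)) ≠ [] := by
    rw [hpos_cons]; simp
  have hT := pvTournament_eq (posCells.map (fun p => (g p, p))) hne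
  have hmapcons : posCells.map (fun p => (g p, p))
      = (g ((0 : Nat), (0 : Nat)), ((0 : Nat), (0 : Nat)))
        :: rest.map (fun p => (g p, p)) := by
    rw [hpos_cons]; rfl
  have hfmin : pvFmin (posCells.map (fun p => (g p, p)))
      = (fun p => (g p, p)) (rest.foldl (fun mm x => if g x < g mm then x else mm) (0, 0)) := by
    rw [hmapcons]
    simp only [pvFmin]
    exact foldl_opmin_map g rest (0, 0)
  have hfmax : pvFmax (posCells.map (fun p => (g p, p)))
      = (fun p => (g p, p)) (rest.foldl (fun mm x => if g mm < g x then x else mm) (0, 0)) := by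
    rw [hmapcons]
    simp only [pvFmax]
    exact foldl_opmax_map g rest (0, 0)
  simp only [hcells, hA, hAfold, hT, hfmin, hfmax]

-- ===== VERDICT (by name: the statement is the Claim_ definition above) =====
theorem find_suspicious_spots_spec : Claim_equal_find_suspicious_spots := by
  intro grid _ _
  unfold Spec_find_suspicious_spots find_suspicious_spots find_suspicious_spots_alt
  by_cases hdeg : grid = [] ∨ grid.headD [] = []
  · rw [if_pos hdeg]
    rcases hdeg with h | h
    · simp [h]
    · have h' : grid.head?.getD [] = [] := by
        rw [← List.headD_eq_head?_getD]; exact h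
      simp [h']
  · rw [if_neg hdeg]
    push Not at hdeg
    obtain ⟨hg, hr⟩ := hdeg
    have hn : grid.length ≠ 0 := by simpa [List.length_eq_zero_iff] using hg
    have hm : (grid.headD []).length ≠ 0 := by simpa [List.length_eq_zero_iff] using hr
    exact nested_fold_eq_tournament (fun p => (grid.getD p.1 []).getD p.2 0)
      grid.length (grid.headD []).length hn hm
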